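-- pv_equiv track=rewrite | github.com/dalasor/yandex-algorithms | Yandex5.0/3rd (Множества и словари, хеш)/3C.py | min_removal_count_dict
-- ===== SOURCE A (Python) =====
-- def min_removal_count_dict(a: list) -> int:
--     count = {}
--     for num in a:
--         count[num] = count.get(num, 0) + 1
--
--     max_valid_count = 0
--     for num in count:
--         max_valid_count = max(max_valid_count, count[num] + count.get(num + 1, 0))
--
--     return len(a) - max_valid_count
-- ===== SOURCE B (Python) =====
-- def min_removal_count_dict(a: list) -> int:
--     # Sort, group into (value, run_length) runs, then one linear sweep over
--     # adjacent runs to find the largest kept block of one or two consecutive values.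
--     s = sorted(a)
--     groups = []
--     i = 0
--     while i < len(s):
--         j = i + 1
--         while j < len(s) and s[j] == s[i]:
--             j += 1
--         groups.append((s[i], j - i))
--         i = j
--     best = 0
--     for i in range(len(groups)):
--         v, c = groups[i]
--         cand = c
--         if i + 1 < len(groups) and groups[i + 1][0] == v + 1:
--             cand += groups[i + 1][1]
--         if cand > best:
--             best = cand
--     return len(a) - best
-- ===== Notes on version B (the rewrite author's own statement) =====
-- stated objective: alternative
-- what changed: Replaces the hash-counter with num+1 lookups by sort-then-group: B sorts a copy, walks it into ordered (value, run_length) groups, and one linear sweep over adjacent groups finds the best block of one or two consecutive values.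
import Mathlib
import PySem

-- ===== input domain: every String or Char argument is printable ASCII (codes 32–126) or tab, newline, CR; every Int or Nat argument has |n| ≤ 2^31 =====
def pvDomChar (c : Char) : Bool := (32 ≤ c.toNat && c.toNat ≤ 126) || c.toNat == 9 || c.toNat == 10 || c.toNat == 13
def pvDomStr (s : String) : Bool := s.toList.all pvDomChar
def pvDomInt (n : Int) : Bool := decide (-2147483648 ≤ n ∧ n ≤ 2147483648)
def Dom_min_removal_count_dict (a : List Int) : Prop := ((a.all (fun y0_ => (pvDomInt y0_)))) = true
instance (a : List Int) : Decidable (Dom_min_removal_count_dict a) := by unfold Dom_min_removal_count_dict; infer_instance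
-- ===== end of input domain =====

-- B replaces A's hash-counter with num+1 lookups by sort-then-group runs and a linear sweep over adjacent runs (alternative decomposition, not claimed faster).

-- ===== PORT A =====
-- count[num] with num drawn from count's own keys never raises, so it is getD num 0 here.
def min_removal_count_dict (a : List Int) : Int :=
  let count := a.foldl (fun d num => d.insert num (d.getD num 0 + 1)) PySem.Dict.empty
  let max_valid_count := count.keys.foldl
    (fun m num => max m (count.getD num 0 + count.getD (num + 1) 0)) 0
  (a.length : Int) - max_valid_count

-- ===== PORT B =====
-- the outer while loop of Source B: peel one run (value, run length) off the front of the sorted rest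
def pvGroupsB : List Int → List (Int × Int)
  | [] => []
  | x :: xs =>
    (x, 1 + ((xs.takeWhile (· == x)).length : Int)) :: pvGroupsB (xs.dropWhile (· == x))
termination_by xs => xs.length
decreasing_by
  exact Nat.lt_succ_of_le (List.length_dropWhile_le (fun y => y == x) xs)

-- Source B's 'groups[i + 1][1] if i + 1 < len(groups) and groups[i + 1][0] == v + 1 else 0', with groups[i+1:] = rest
def pvNext (v : Int) : List (Int × Int) → Int
  | (w, d) :: _ => if w == v + 1 then d else 0
  | [] => 0

-- the 'for i in range(len(groups))' sweep of Source B: groups[i+1] is the head of the remaining list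
def pvSweepB : List (Int × Int) → Int → Int
  | [], best => best
  | (v, c) :: rest, best =>
    let cand := c + pvNext v rest
    pvSweepB rest (if cand > best then cand else best)

def min_removal_count_dict_alt (a : List Int) : Int :=
  (a.length : Int) - pvSweepB (pvGroupsB (PySem.List.sorted a (fun x => x) false)) 0

-- ===== PRECONDITION & SPEC =====
def Spec_min_removal_count_dict (a : List Int) (out : Int) : Prop := out = min_removal_count_dict_alt a
instance (a : List Int) (out : Int) : Decidable (Spec_min_removal_count_dict a out) := by unfold Spec_min_removal_count_dict; infer_instance

-- ===== CLAIM (what is proved, stated in full; the proofs are below) =====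
def Claim_equal_min_removal_count_dict : Prop := ∀ (a : List Int), Dom_min_removal_count_dict a → Spec_min_removal_count_dict a (min_removal_count_dict a)

-- ===== LEMMAS AND PROOFS =====

-- the candidate value both programs maximise for the value k: occurrences of k plus occurrences of k+1 in xs
def pvG (xs : List Int) (k : Int) : Int := (xs.count k : Int) + (xs.count (k + 1) : Int)
def pvFold (xs : List Int) (l : List Int) (m : Int) : Int := l.foldl (fun m k => max m (pvG xs k)) m

-- A is the fold of max over the counter's keys (first-occurrence order)
lemma pvA_eq (a : List Int) :
    min_removal_count_dict a = (a.length : Int) - pvFold a (PySem.Set.ofList a) 0 := by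
  unfold min_removal_count_dict pvFold pvG
  rw [PySem.Dict.foldl_insert_getD_add_one_eq_counter]
  simp only [PySem.Dict.keys_counter, PySem.Dict.getD_counter]

-- on a sorted list, the groups carry exact counts, strictly increasing values, and all values
lemma pvGroupsB_spec (xs : List Int) (hs : xs.Pairwise (· ≤ ·)) :
    (∀ p ∈ pvGroupsB xs, p.2 = (xs.count p.1 : Int)) ∧
    ((pvGroupsB xs).map Prod.fst).Pairwise (· < ·) ∧
    (∀ v, v ∈ xs ↔ v ∈ (pvGroupsB xs).map Prod.fst) := by
  induction xs using pvGroupsB.induct with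
  | case1 => simp [pvGroupsB]
  | case2 x t ih =>
    set tk := t.takeWhile (· == x) with htk
    set dr := t.dropWhile (· == x) with hdr
    have hsplit : t = tk ++ dr := (List.takeWhile_append_dropWhile (p := (· == x)) (l := t)).symm
    have htkx : ∀ y ∈ tk, y = x := by
      intro y hy
      have := List.mem_takeWhile_imp hy
      simpa using this
    have hxt : ∀ y ∈ t, x ≤ y := (List.pairwise_cons.mp hs).1
    have hst : t.Pairwise (· ≤ ·) := (List.pairwise_cons.mp hs).2
    have hsdr : dr.Pairwise (· ≤ ·) := hst.sublist (List.dropWhile_sublist _)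
    have hdrgt : ∀ y ∈ dr, x < y := by
      intro y hy
      rcases hdrv : dr with _ | ⟨d₀, dtl⟩
      · rw [hdrv] at hy; simp at hy
      · have hdd : t.dropWhile (· == x) = d₀ :: dtl := by rw [← hdr, hdrv]
        have h := List.head?_dropWhile_not (fun y => y == x) t
        rw [show (List.dropWhile (fun y => y == x) t) = d₀ :: dtl from hdd] at h
        simp only [List.head?_cons] at h
        have hd₀ne : d₀ ≠ x := by simpa using h
        have hd₀mem : d₀ ∈ t := by rw [hsplit, hdrv]; simp
        have hd₀x : x < d₀ := lt_of_le_of_ne (hxt d₀ hd₀mem) (Ne.symm hd₀ne)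
        rw [hdrv] at hy hsdr
        rcases List.mem_cons.mp hy with h' | h'
        · omega
        · have : d₀ ≤ y := (List.pairwise_cons.mp hsdr).1 y h'
          omega
    obtain ⟨ih1, ih2, ih3⟩ := ih hsdr
    rw [show pvGroupsB (x :: t) =
      (x, 1 + (tk.length : Int)) :: pvGroupsB dr from by rw [pvGroupsB]]
    refine ⟨?_, ?_, ?_⟩
    · intro p hp
      rcases List.mem_cons.mp hp with h | h
      · subst h
        have hcx : (x :: t).count x = 1 + tk.length := by
          rw [hsplit]
          have h1 : tk.count x = tk.length := List.count_eq_length.mpr (by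
            intro b hb; have := htkx b hb; simp [this])
          have h2 : dr.count x = 0 := List.count_eq_zero.mpr (by
            intro hmem; exact absurd rfl (ne_of_lt (hdrgt x hmem)))
          simp [List.count_append, h1, h2]
          omega
        simp only [hcx]
        push_cast
        ring
      · have h1 := ih1 p h
        have hpf : p.1 ∈ dr := (ih3 p.1).mpr (List.mem_map_of_mem h)
        have hne : p.1 ≠ x := (ne_of_lt (hdrgt p.1 hpf)).symm
        have htk0 : tk.count p.1 = 0 := List.count_eq_zero.mpr (by
          intro hmem; exact hne (htkx p.1 hmem))
        have : (x :: t).count p.1 = dr.count p.1 := by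
          rw [hsplit]
          simp [List.count_cons, List.count_append, htk0]
          intro hc; exact absurd hc.symm hne
        rw [h1, this]
    · simp only [List.map_cons]
      rw [List.pairwise_cons]
      exact ⟨fun u hu => hdrgt u ((ih3 u).mpr hu), ih2⟩
    · intro v
      simp only [List.map_cons, List.mem_cons]
      rw [hsplit]
      constructor
      · intro hv
        rcases hv with h | h
        · exact Or.inl h
        · rcases List.mem_append.mp h with h | h
          · exact Or.inl (htkx v h)
          · exact Or.inr ((ih3 v).mp h)
      · intro hv
        rcases hv with h | h
        · simp [h]
        · have := (ih3 v).mpr h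
          simp [this]

-- the sweep over such a group list is the fold of max over its values
lemma pvSweepB_eq (xs : List Int) :
    ∀ (gs : List (Int × Int)) (best : Int),
      ((gs.map Prod.fst).Pairwise (· < ·)) →
      (∀ p ∈ gs, p.2 = (xs.count p.1 : Int)) →
      (∀ u w, u ∈ gs.map Prod.fst → w ∈ xs → u < w → w ∈ gs.map Prod.fst) →
      pvSweepB gs best = pvFold xs (gs.map Prod.fst) best := by
  intro gs
  induction gs with
  | nil => intro best _ _ _; simp [pvSweepB, pvFold]
  | cons p rest ih =>
    obtain ⟨v, c⟩ := p
    intro best hpw hcnt hH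
    have hc : c = (xs.count v : Int) := hcnt (v, c) (by simp)
    have hnx : pvNext v rest = (xs.count (v + 1) : Int) := by
      match rest with
      | [] =>
        have : v + 1 ∉ xs := by
          intro hmem
          have := hH v (v + 1) (by simp) hmem (by omega)
          simp at this
        simp [pvNext, List.count_eq_zero.mpr this]
      | (w, d) :: rtl =>
        by_cases hw : w = v + 1
        · subst hw
          simp only [pvNext, beq_self_eq_true, if_true]
          exact hcnt (v + 1, d) (by simp)
        · have hvw : v < w := (List.pairwise_cons.mp hpw).1 w (by simp)
          have : v + 1 ∉ xs := by
            intro hmem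
            have h1 := hH v (v + 1) (by simp) hmem (by omega)
            simp only [List.map_cons, List.mem_cons] at h1
            rcases h1 with h1 | h1 | h1
            · omega
            · exact hw h1.symm
            · have hpw' : (List.map Prod.fst ((w, d) :: rtl)).Pairwise (· < ·) :=
                (List.pairwise_cons.mp hpw).2
              have hwlt : w < v + 1 := by
                have := (List.pairwise_cons.mp hpw').1 (v + 1) (by simpa using h1)
                simpa using this
              omega
          have : (xs.count (v + 1) : Int) = 0 := by
            simp [List.count_eq_zero.mpr this]
          rw [this]
          simp [pvNext, show (w == v + 1) = false by simp [hw]]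
    show pvSweepB ((v, c) :: rest) best = pvFold xs (List.map Prod.fst ((v, c) :: rest)) best
    simp only [pvSweepB]
    simp only [List.map_cons]
    rw [show pvFold xs (v :: List.map Prod.fst rest) best
        = pvFold xs (List.map Prod.fst rest) (max best (pvG xs v)) from rfl]
    have hcand : c + pvNext v rest = pvG xs v := by
      rw [hnx, hc]; rfl
    rw [hcand]
    have hbest : (if pvG xs v > best then pvG xs v else best) = max best (pvG xs v) := by
      rcases le_or_gt (pvG xs v) best with h | h <;> simp [max_def] <;> omega
    rw [hbest]
    exact ih _ (List.pairwise_cons.mp hpw).2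
      (fun p hp => hcnt p (by simp [hp]))
      (by
        intro u w hu hw hlt
        have hvu : v < u := (List.pairwise_cons.mp hpw).1 u hu
        have := hH u w (by simp [hu]) hw hlt
        simp only [List.map_cons, List.mem_cons] at this
        rcases this with h | h
        · omega
        · exact h)

-- ===== VERDICT (by name: the statement is the Claim_ definition above) =====
theorem min_removal_count_dict_spec : Claim_equal_min_removal_count_dict := by
  intro a _
  unfold Spec_min_removal_count_dict min_removal_count_dict_alt
  rw [pvA_eq]
  set s := PySem.List.sorted a (fun x => x) false with hsdef
  have hperm : s.Perm a := PySem.List.sorted_perm a (fun x => x) false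
  have hsort : s.Pairwise (· ≤ ·) := by
    have := PySem.List.sorted_pairwise a (fun x => x)
    simpa [hsdef] using this
  obtain ⟨hcnt, hpw, hmem⟩ := pvGroupsB_spec s hsort
  have hsweep := pvSweepB_eq s (pvGroupsB s) 0 hpw hcnt
    (by intro u w _ hw _; exact (hmem w).1 hw)
  rw [hsweep]
  have hcount : ∀ l m, pvFold s l m = pvFold a l m := by
    intro l m
    simp [pvFold, pvG, hperm.count_eq]
  rw [hcount]
  have hnd1 : ((pvGroupsB s).map Prod.fst).Nodup := hpw.imp (fun h => ne_of_lt h)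
  have hnd2 : (PySem.Set.ofList a).Nodup := PySem.Set.nodup_ofList a
  have hp : ((pvGroupsB s).map Prod.fst).Perm (PySem.Set.ofList a) := by
    rw [List.perm_ext_iff_of_nodup hnd1 hnd2]
    intro v
    rw [← hmem v, PySem.Set.mem_ofList, PySem.List.mem_sorted]
  have hfp : ∀ (l₁ l₂ : List Int) (m : Int), l₁.Perm l₂ → pvFold a l₁ m = pvFold a l₂ m := by
    intro l₁ l₂ m h
    exact @List.Perm.foldl_eq _ _ (fun m k => max m (pvG a k)) _ _
      ⟨fun b x y => max_right_comm b (pvG a x) (pvG a y)⟩ h m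
  rw [hfp _ _ _ hp]
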